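-- pv_equiv track=rewrite | github.com/extragithub/aoc-2020 | 11/part2.py | run_pass
-- ===== SOURCE A (Python) =====
-- import copy
--
-- DIRECTIONS = [
--     [1, 0],
--     [1, 1],
--     [0, 1],
--     [-1, 1],
--     [-1, 0],
--     [-1, -1],
--     [0, -1],
--     [1, -1],
-- ]
--
-- def yield_vector(seats, coords, direction, stop=[]):
--     x = coords[0] + direction[0]
--     y = coords[1] + direction[1]
--
--     while x >= 0 and y >= 0 and x < len(seats[0]) and y < len(seats):
--         if seats[y][x] in stop:
--             yield seats[y][x]
--             x = y = -1
--         else: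
--             yield seats[y][x]
--             x += direction[0]
--             y += direction[1]
--
-- def will_be_empty(seats, coords):
--     if not seats[coords[1]][coords[0]] == "#":
--         return False
--
--     count = 0
--     for direction in DIRECTIONS:
--         vector = [val for val in yield_vector(seats, coords, direction, "#L")]
--         if "#" in vector:
--             count += 1
--
--         if count >= 5:
--             return True
--
--     return False
--
-- def will_be_occupied(seats, coords):
--     if not seats[coords[1]][coords[0]] == "L":
--         return False
--
--     for direction in DIRECTIONS:
--         vector = [val for val in yield_vector(seats, coords, direction, "#L")]
--         if "#" in vector:
--             return False
--
--     return True
--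
-- def run_pass(seats):
--     updated = copy.deepcopy(seats)
--     occupied = 0
--
--     for x in range(len(seats[0])):
--         for y in range(len(seats)):
--             coords = (x, y)
--
--             if will_be_occupied(seats, coords):
--                 updated[y][x] = "#"
--                 occupied += 1
--             elif will_be_empty(seats, coords):
--                 updated[y][x] = "L"
--             else:
--                 updated[y][x] = seats[y][x]
--                 if updated[y][x] == "#":
--                     occupied += 1
--
--     return updated, occupied
-- ===== SOURCE B (Python) =====
-- DIRS = [(1, 0), (1, 1), (0, 1), (-1, 1), (-1, 0), (-1, -1), (0, -1), (1, -1)]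
--
--
-- def run_pass(seats):
--     h, w = len(seats), len(seats[0])
--
--     # For each direction, a dynamic-programming sweep fills vis[y][x] with the
--     # first seat cell visible from (x, y) in that direction: the cell one step
--     # away if it is a seat, otherwise that cell's own answer, which the sweep
--     # order guarantees has already been computed.  count[y][x] tallies the
--     # directions whose visible seat is occupied.
--     count = [[0] * w for _ in range(h)]
--     for dx, dy in DIRS:
--         vis = [[None] * w for _ in range(h)]
--         ys = reversed(range(h)) if dy > 0 else range(h)
--         xs = list(reversed(range(w))) if dx > 0 else list(range(w))
--         for y in ys:
--             for x in xs:
--                 nx, ny = x + dx, y + dy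
--                 if 0 <= nx < w and 0 <= ny < h:
--                     c = seats[ny][nx]
--                     vis[y][x] = c if c in "#L" else vis[ny][nx]
--         for y in range(h):
--             for x in range(w):
--                 if vis[y][x] == "#":
--                     count[y][x] += 1
--
--     updated = [list(row) for row in seats]
--     occupied = 0
--     for y in range(h):
--         for x in range(w):
--             c = seats[y][x]
--             k = count[y][x]
--             c = "#" if c == "L" and k == 0 else ("L" if c == "#" and k >= 5 else c)
--             updated[y][x] = c
--             if c == "#":
--                 occupied += 1
--     return updated, occupied
-- ===== Notes on version B (the rewrite author's own statement) =====
-- stated objective: alternative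
-- what changed: B replaces A's per-seat ray casting (two early-exiting predicates that re-march and materialise the 8 rays for every cell) with eight dynamic-programming grid sweeps that compute every cell's first visible seat per direction in one pass each, then a single count-then-dispatch rebuild; Pre_ excludes only inputs where A raises IndexError (empty grid, or a row shorter than row 0).
import Mathlib
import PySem

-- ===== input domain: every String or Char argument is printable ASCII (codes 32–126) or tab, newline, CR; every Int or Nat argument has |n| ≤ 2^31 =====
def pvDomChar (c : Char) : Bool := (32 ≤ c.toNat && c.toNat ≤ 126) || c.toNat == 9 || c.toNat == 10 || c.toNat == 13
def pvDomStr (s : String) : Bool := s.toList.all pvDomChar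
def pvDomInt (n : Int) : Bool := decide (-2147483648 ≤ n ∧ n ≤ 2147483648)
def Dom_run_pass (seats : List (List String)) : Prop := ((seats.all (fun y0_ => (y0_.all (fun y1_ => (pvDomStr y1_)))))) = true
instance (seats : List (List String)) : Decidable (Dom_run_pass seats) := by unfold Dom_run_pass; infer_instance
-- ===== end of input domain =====

-- B replaces A's per-cell ray casting (two early-exiting predicates that re-march and
-- materialise the 8 rays for every cell) with eight dynamic-programming grid sweeps that
-- compute each cell's first visible seat per direction in one pass, then one
-- count-then-dispatch rebuild; objective: alternative algorithm (return value only —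
-- A also mutates a deepcopy internally, which no caller can observe).

-- ===== PORT A =====
-- shared grid accessors (both Pythons compute len(seats[0]), len(seats), seats[y][x] identically)
def pvDirs : List (Int × Int) := [(1,0),(1,1),(0,1),(-1,1),(-1,0),(-1,-1),(0,-1),(1,-1)]
def pvW (seats : List (List String)) : Int := ((seats.headD []).length : Int)
def pvH (seats : List (List String)) : Int := (seats.length : Int)
def pvCell (seats : List (List String)) (x y : Int) : String :=
  (seats.getD y.toNat []).getD x.toNat ""
-- fuel bound for the while loops: the rays march one step per iteration inside a
-- w × h box, so they take at most max w h + 1 iterations; w + h + 2 always suffices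
def pvFuel (seats : List (List String)) : Nat := (seats.headD []).length + seats.length + 2

-- the while loop of A's yield_vector (the generator is consumed into a list at once)
def yieldVecGo (seats : List (List String)) (dx dy : Int) : Nat → Int → Int → List String
  | 0, _, _ => []
  | fuel+1, x, y =>
    if 0 ≤ x ∧ 0 ≤ y ∧ x < pvW seats ∧ y < pvH seats then
      if PySem.Str.isIn (pvCell seats x y) "#L" then
        pvCell seats x y :: yieldVecGo seats dx dy fuel (-1) (-1)
      else
        pvCell seats x y :: yieldVecGo seats dx dy fuel (x + dx) (y + dy)
    else []

def yield_vector (seats : List (List String)) (x y dx dy : Int) : List String :=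
  yieldVecGo seats dx dy (pvFuel seats) (x + dx) (y + dy)

def will_be_occupied (seats : List (List String)) (x y : Int) : Bool :=
  if ¬ (pvCell seats x y = "L") then false
  else pvDirs.all (fun d => !((yield_vector seats x y d.1 d.2).contains "#"))

def wbeLoop (seats : List (List String)) (x y : Int) : List (Int × Int) → Int → Bool
  | [], _ => false
  | d :: ds, count =>
    let count' := if (yield_vector seats x y d.1 d.2).contains "#" then count + 1 else count
    if 5 ≤ count' then true else wbeLoop seats x y ds count'

def will_be_empty (seats : List (List String)) (x y : Int) : Bool :=
  if ¬ (pvCell seats x y = "#") then false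
  else wbeLoop seats x y pvDirs 0

def run_pass (seats : List (List String)) : List (List String) × Int :=
  let updated := seats   -- copy.deepcopy(seats); values are immutable here
  (PySem.List.pyRange 0 (pvW seats) 1).foldl (fun st x =>
    (PySem.List.pyRange 0 (pvH seats) 1).foldl (fun st y =>
      if will_be_occupied seats x y then
        (st.1.set y.toNat ((st.1.getD y.toNat []).set x.toNat "#"), st.2 + 1)
      else if will_be_empty seats x y then
        (st.1.set y.toNat ((st.1.getD y.toNat []).set x.toNat "L"), st.2)
      else
        (st.1.set y.toNat ((st.1.getD y.toNat []).set x.toNat (pvCell seats x y)),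
         if pvCell seats x y = "#" then st.2 + 1 else st.2)
    ) st) (updated, (0 : Int))

-- ===== PORT B =====
-- the body of B's innermost sweep statement: fill vis[y][x] for direction (dx, dy)
def visStep (seats : List (List String)) (dx dy : Int)
    (t : List (List (Option String))) (y x : Int) : List (List (Option String)) :=
  let nx := x + dx
  let ny := y + dy
  if 0 ≤ nx ∧ nx < pvW seats ∧ 0 ≤ ny ∧ ny < pvH seats then
    t.set y.toNat ((t.getD y.toNat []).set x.toNat
      (if PySem.Str.isIn (pvCell seats nx ny) "#L" then some (pvCell seats nx ny)
       else (t.getD ny.toNat []).getD nx.toNat none))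
  else t

def run_pass_alt (seats : List (List String)) : List (List String) × Int :=
  let h := pvH seats
  let w := pvW seats
  let count :=
    pvDirs.foldl (fun count d =>
      let vis0 : List (List (Option String)) :=
        List.replicate h.toNat (List.replicate w.toNat (none : Option String))
      let ys := if d.2 > 0 then (PySem.List.pyRange 0 h 1).reverse else PySem.List.pyRange 0 h 1
      let xs := if d.1 > 0 then (PySem.List.pyRange 0 w 1).reverse else PySem.List.pyRange 0 w 1
      let vis := ys.foldl (fun t y => xs.foldl (fun t x => visStep seats d.1 d.2 t y x) t) vis0
      (PySem.List.pyRange 0 h 1).foldl (fun cnt y =>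
        (PySem.List.pyRange 0 w 1).foldl (fun cnt x =>
          if (vis.getD y.toNat []).getD x.toNat none == some "#" then
            cnt.set y.toNat ((cnt.getD y.toNat []).set x.toNat
              (((cnt.getD y.toNat []).getD x.toNat 0) + 1))
          else cnt) cnt) count)
      (List.replicate h.toNat (List.replicate w.toNat (0 : Int)))
  (PySem.List.pyRange 0 h 1).foldl (fun st y =>
    (PySem.List.pyRange 0 w 1).foldl (fun st x =>
      let c := pvCell seats x y
      let k := (count.getD y.toNat []).getD x.toNat 0
      let c' := if c = "L" ∧ k = 0 then "#" else if c = "#" ∧ 5 ≤ k then "L" else c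
      (st.1.set y.toNat ((st.1.getD y.toNat []).set x.toNat c'),
       if c' = "#" then st.2 + 1 else st.2)) st)
    (seats.map (fun row => row), (0 : Int))

-- ===== PRECONDITION & SPEC =====
-- Pre_ excludes exactly the inputs where the Python A raises IndexError: the empty grid
-- (len(seats[0])) and grids with a row shorter than row 0 (seats[y][x] for x < len(seats[0])).
def Pre_run_pass (seats : List (List String)) : Prop :=
  seats ≠ [] ∧ ∀ row ∈ seats, (seats.headD []).length ≤ row.length
instance (seats : List (List String)) : Decidable (Pre_run_pass seats) := by
  unfold Pre_run_pass; infer_instance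

def pvWitness_run_pass : List (List String) := [["L", "."], ["#", "L"]]

def Spec_run_pass (seats : List (List String)) (out : List (List String) × Int) : Prop := out = run_pass_alt seats
instance (seats : List (List String)) (out : List (List String) × Int) : Decidable (Spec_run_pass seats out) := by unfold Spec_run_pass; infer_instance

-- ===== CLAIM (what is proved, stated in full; the proofs are below) =====
def Claim_equal_run_pass : Prop := ∀ (seats : List (List String)), Dom_run_pass seats → Pre_run_pass seats → Spec_run_pass seats (run_pass seats)

-- ===== LEMMAS AND PROOFS =====


-- ---- proof-side characterisation of a ray: first visible seat in one direction ----
def firstVisible (seats : List (List String)) (dx dy : Int) : Nat → Int → Int → Option String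
  | 0, _, _ => none
  | fuel+1, x, y =>
    if 0 ≤ x ∧ x < pvW seats ∧ 0 ≤ y ∧ y < pvH seats then
      if PySem.Str.isIn (pvCell seats x y) "#L" then some (pvCell seats x y)
      else firstVisible seats dx dy fuel (x + dx) (y + dy)
    else none

def pvR (seats : List (List String)) (d : Int × Int) (x y : Int) : Option String :=
  firstVisible seats d.1 d.2 (pvFuel seats) (x + d.1) (y + d.2)

def pvCnt (seats : List (List String)) (x y : Int) : Nat :=
  pvDirs.countP (fun d => pvR seats d x y == some "#")

def newCell (seats : List (List String)) (x y : Int) : String :=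
  if pvCell seats x y = "L" ∧ pvCnt seats x y = 0 then "#"
  else if pvCell seats x y = "#" ∧ 5 ≤ pvCnt seats x y then "L"
  else pvCell seats x y

def pvInd (seats : List (List String)) (x y : Int) : Int :=
  if newCell seats x y == "#" then 1 else 0

-- legal direction shapes (the 8 members of pvDirs)
def pvDirOk (dx dy : Int) : Prop :=
  (dx = 1 ∨ dx = -1 ∨ dx = 0) ∧ (dy = 1 ∨ dy = -1 ∨ dy = 0) ∧ ¬(dx = 0 ∧ dy = 0)

-- steps before the ray leaves the grid along its moving coordinate
def pvEs (seats : List (List String)) (dx dy x y : Int) : Nat :=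
  if dx = 1 then (pvW seats - x).toNat
  else if dx = -1 then (x + 1).toNat
  else if dy = 1 then (pvH seats - y).toNat
  else (y + 1).toNat

lemma fv_congr (seats : List (List String)) (dx dy : Int) (hD : pvDirOk dx dy) :
    ∀ (r n m : Nat) (x y : Int), pvEs seats dx dy x y ≤ r → r < n → r < m →
      firstVisible seats dx dy n x y = firstVisible seats dx dy m x y := by
  obtain ⟨hdx, hdy, hne⟩ := hD
  intro r
  induction r with
  | zero =>
    intro n m x y hes hn hm
    obtain ⟨n', rfl⟩ : ∃ n', n = n' + 1 := ⟨n - 1, by omega⟩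
    obtain ⟨m', rfl⟩ : ∃ m', m = m' + 1 := ⟨m - 1, by omega⟩
    rw [firstVisible, firstVisible]
    have hng : ¬ (0 ≤ x ∧ x < pvW seats ∧ 0 ≤ y ∧ y < pvH seats) := by
      rcases hdx with rfl | rfl | rfl <;> rcases hdy with rfl | rfl | rfl <;>
        first
          | exact absurd ⟨rfl, rfl⟩ hne
          | (norm_num [pvEs] at hes; omega)
    rw [if_neg hng, if_neg hng]
  | succ r ih =>
    intro n m x y hes hn hm
    obtain ⟨n', rfl⟩ : ∃ n', n = n' + 1 := ⟨n - 1, by omega⟩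
    obtain ⟨m', rfl⟩ : ∃ m', m = m' + 1 := ⟨m - 1, by omega⟩
    rw [firstVisible, firstVisible]
    by_cases hg : 0 ≤ x ∧ x < pvW seats ∧ 0 ≤ y ∧ y < pvH seats
    · rw [if_pos hg, if_pos hg]
      by_cases hs : PySem.Str.isIn (pvCell seats x y) "#L" = true
      · rw [if_pos hs, if_pos hs]
      · rw [if_neg hs, if_neg hs]
        refine ih n' m' (x + dx) (y + dy) ?_ (by omega) (by omega)
        rcases hdx with rfl | rfl | rfl <;> rcases hdy with rfl | rfl | rfl <;>
          first
            | exact absurd ⟨rfl, rfl⟩ hne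
            | (norm_num [pvEs] at hes ⊢; omega)
    · rw [if_neg hg, if_neg hg]

-- the DP recurrence the sweeps implement, satisfied by the ray function
lemma R_rec (seats : List (List String)) (dx dy : Int) (hD : pvDirOk dx dy) (x y : Int) :
    pvR seats (dx, dy) x y =
      if 0 ≤ x + dx ∧ x + dx < pvW seats ∧ 0 ≤ y + dy ∧ y + dy < pvH seats then
        (if PySem.Str.isIn (pvCell seats (x + dx) (y + dy)) "#L" then
           some (pvCell seats (x + dx) (y + dy))
         else pvR seats (dx, dy) (x + dx) (y + dy))
      else none := by
  show firstVisible seats dx dy (pvFuel seats) (x + dx) (y + dy) = _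
  have hF : pvFuel seats = ((seats.headD []).length + seats.length + 1) + 1 := by
    unfold pvFuel; omega
  rw [hF, firstVisible]
  by_cases hg : 0 ≤ x + dx ∧ x + dx < pvW seats ∧ 0 ≤ y + dy ∧ y + dy < pvH seats
  · rw [if_pos hg, if_pos hg]
    by_cases hs : PySem.Str.isIn (pvCell seats (x + dx) (y + dy)) "#L" = true
    · rw [if_pos hs, if_pos hs]
    · rw [if_neg hs, if_neg hs]
      show _ = firstVisible seats dx dy (pvFuel seats) (x + dx + dx) (y + dy + dy)
      have hes : pvEs seats dx dy (x + dx + dx) (y + dy + dy) ≤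
          (seats.headD []).length + seats.length := by
        have hW : pvW seats = ((seats.headD []).length : Int) := rfl
        have hW' : ((seats.headD []).length : Int) = ((seats.head?.getD []).length : Int) := by
          rw [List.headD_eq_head?_getD]
        have hH : pvH seats = (seats.length : Int) := rfl
        obtain ⟨hdx, hdy, hne⟩ := hD
        rcases hdx with rfl | rfl | rfl <;> rcases hdy with rfl | rfl | rfl <;>
          first
            | exact absurd ⟨rfl, rfl⟩ hne
            | (norm_num [pvEs]; omega)
      exact fv_congr seats dx dy hD ((seats.headD []).length + seats.length)
        ((seats.headD []).length + seats.length + 1) (pvFuel seats)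
        (x + dx + dx) (y + dy + dy) hes (by omega) (by unfold pvFuel; omega)
  · rw [if_neg hg, if_neg hg]

-- ---- A-side: the ray predicates equal the count-then-dispatch classification ----
lemma yieldVecGo_neg (seats : List (List String)) (dx dy : Int) (n : Nat) :
    yieldVecGo seats dx dy n (-1) (-1) = [] := by
  cases n with
  | zero => rfl
  | succ m => rw [yieldVecGo, if_neg (by omega)]

-- '#' occurs in A's collected vector iff the first visible seat is '#'
lemma ray_eq (seats : List (List String)) (dx dy : Int) :
    ∀ (n : Nat) (x y : Int),
      (yieldVecGo seats dx dy n x y).contains "#"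
        = (firstVisible seats dx dy n x y == some "#") := by
  intro n
  induction n with
  | zero => intro x y; rfl
  | succ m ih =>
    intro x y
    rw [yieldVecGo, firstVisible]
    by_cases hg : 0 ≤ x ∧ 0 ≤ y ∧ x < pvW seats ∧ y < pvH seats
    · rw [if_pos hg, if_pos (show 0 ≤ x ∧ x < pvW seats ∧ 0 ≤ y ∧ y < pvH seats by omega)]
      by_cases hs : PySem.Str.isIn (pvCell seats x y) "#L" = true
      · rw [if_pos hs, if_pos hs, yieldVecGo_neg]
        simp only [List.contains_cons, List.contains_nil, Bool.or_false, Option.some_beq_some]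
        exact Bool.beq_comm
      · rw [if_neg hs, if_neg hs]
        have hne : ("#" == pvCell seats x y) = false :=
          beq_eq_false_iff_ne.mpr (fun he => hs (he ▸ (by decide)))
        rw [List.contains_cons, ih, hne, Bool.false_or]
    · rw [if_neg hg, if_neg (show ¬(0 ≤ x ∧ x < pvW seats ∧ 0 ≤ y ∧ y < pvH seats) by omega)]
      rfl

lemma hit_eq (seats : List (List String)) (x y : Int) (d : Int × Int) :
    (yield_vector seats x y d.1 d.2).contains "#" = (pvR seats d x y == some "#") :=
  ray_eq seats d.1 d.2 (pvFuel seats) (x + d.1) (y + d.2)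

lemma wbo_iff (seats : List (List String)) (x y : Int) :
    will_be_occupied seats x y = true ↔ (pvCell seats x y = "L" ∧ pvCnt seats x y = 0) := by
  unfold will_be_occupied
  by_cases hc : pvCell seats x y = "L"
  · rw [if_neg (by simpa using hc)]
    simp only [List.all_eq_true, Bool.not_eq_eq_eq_not, Bool.not_true, hc, true_and]
    unfold pvCnt
    rw [List.countP_eq_zero]
    constructor
    · intro h d hd
      have := h d hd
      rw [hit_eq] at this
      simp [this]
    · intro h d hd
      rw [hit_eq]
      simpa using h d hd
  · rw [if_pos (by simpa using hc)]
    simp [hc]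

lemma wbeLoop_iff (seats : List (List String)) (x y : Int) :
    ∀ (ds : List (Int × Int)) (acc : Int), acc < 5 →
      (wbeLoop seats x y ds acc = true ↔
        5 ≤ acc + (ds.countP (fun d => (yield_vector seats x y d.1 d.2).contains "#") : Int)) := by
  intro ds
  induction ds with
  | nil => intro acc h; simp [wbeLoop]; omega
  | cons d ds ih =>
    intro acc h
    rw [wbeLoop]
    simp only [List.countP_cons]
    by_cases hd : (yield_vector seats x y d.1 d.2).contains "#" = true
    · simp only [hd, if_true]
      by_cases h5 : (5 : Int) ≤ acc + 1
      · rw [if_pos h5]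
        have : (0 : Int) ≤ (ds.countP (fun d => (yield_vector seats x y d.1 d.2).contains "#") : Int) := by positivity
        simp only [true_iff]
        push_cast
        omega
      · rw [if_neg h5, ih (acc + 1) (by omega)]
        push_cast
        omega
    · simp only [Bool.not_eq_true] at hd
      simp only [hd, Bool.false_eq_true, if_false]
      rw [if_neg (by omega), ih acc h]
      push_cast
      omega

lemma wbe_iff (seats : List (List String)) (x y : Int) :
    will_be_empty seats x y = true ↔ (pvCell seats x y = "#" ∧ 5 ≤ pvCnt seats x y) := by
  unfold will_be_empty
  by_cases hc : pvCell seats x y = "#"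
  · rw [if_neg (by simpa using hc)]
    rw [wbeLoop_iff seats x y pvDirs 0 (by omega)]
    have hcong : pvDirs.countP (fun d => (yield_vector seats x y d.1 d.2).contains "#")
        = pvCnt seats x y := by
      unfold pvCnt
      exact List.countP_congr (fun d _ => by rw [hit_eq])
    rw [hcong]
    simp only [hc, true_and]
    omega
  · rw [if_pos (by simpa using hc)]
    simp [hc]

lemma stepA_eq (seats : List (List String)) (x y : Int) (st : List (List String) × Int) :
    (if will_be_occupied seats x y then
        (st.1.set y.toNat ((st.1.getD y.toNat []).set x.toNat "#"), st.2 + 1)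
      else if will_be_empty seats x y then
        (st.1.set y.toNat ((st.1.getD y.toNat []).set x.toNat "L"), st.2)
      else
        (st.1.set y.toNat ((st.1.getD y.toNat []).set x.toNat (pvCell seats x y)),
         if pvCell seats x y = "#" then st.2 + 1 else st.2))
    = (st.1.set y.toNat ((st.1.getD y.toNat []).set x.toNat (newCell seats x y)),
       st.2 + pvInd seats x y) := by
  have hnc : newCell seats x y =
      (if pvCell seats x y = "L" ∧ pvCnt seats x y = 0 then "#"
       else if pvCell seats x y = "#" ∧ 5 ≤ pvCnt seats x y then "L"
       else pvCell seats x y) := rfl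
  by_cases h1 : pvCell seats x y = "L" ∧ pvCnt seats x y = 0
  · have hn : newCell seats x y = "#" := by rw [hnc, if_pos h1]
    rw [if_pos ((wbo_iff seats x y).mpr h1), hn]
    simp [pvInd, hn]
  · rw [if_neg (fun hb => h1 ((wbo_iff seats x y).mp hb))]
    by_cases h2 : pvCell seats x y = "#" ∧ 5 ≤ pvCnt seats x y
    · have hn : newCell seats x y = "L" := by rw [hnc, if_neg h1, if_pos h2]
      rw [if_pos ((wbe_iff seats x y).mpr h2), hn]
      have : pvInd seats x y = 0 := by simp [pvInd, hn]
      rw [this, add_zero]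
    · have hn : newCell seats x y = pvCell seats x y := by rw [hnc, if_neg h1, if_neg h2]
      rw [if_neg (fun hb => h2 ((wbe_iff seats x y).mp hb)), hn]
      have : pvInd seats x y = if pvCell seats x y = "#" then 1 else 0 := by
        simp only [pvInd, hn]
        by_cases hc : pvCell seats x y = "#" <;> simp [hc]
      rw [this]
      by_cases hc : pvCell seats x y = "#" <;> simp [hc]

lemma innerU (v : Int → Int → String) (ind : Int → Int → Int) :
    ∀ (hN : Nat) (x : Int) (g : List (List String)) (occ : Int),
      (PySem.List.pyRange 0 (hN : Int) 1).foldl (fun st y =>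
          (st.1.set y.toNat ((st.1.getD y.toNat []).set x.toNat (v x y)), st.2 + ind x y)) (g, occ)
      = (g.mapIdx (fun yy row => if yy < hN then row.set x.toNat (v x (yy : Int)) else row),
         occ + ((List.range hN).map (fun (yy : Nat) => ind x (yy : Int))).sum) := by
  intro hN
  induction hN with
  | zero =>
    intro x g occ
    rw [show ((0 : Nat) : Int) = 0 from rfl, PySem.List.pyRange_one_eq_nil (le_refl 0)]
    simp only [List.foldl_nil, List.range_zero, List.map_nil, List.sum_nil, add_zero]
    congr 1
    · apply List.ext_getElem (by simp)
      intro i h1 h2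
      simp
  | succ m ih =>
    intro x g occ
    rw [show ((m + 1 : Nat) : Int) = (m : Int) + 1 by push_cast; ring,
        PySem.List.pyRange_one_succ_right (by positivity), List.foldl_append, ih]
    simp only [List.foldl_cons, List.foldl_nil]
    rw [Prod.mk.injEq]
    constructor
    · simp only [Int.toNat_natCast]
      by_cases hmg : m < g.length
      · rw [List.getD_eq_getElem _ _ (by simpa using hmg)]
        simp only [List.getElem_mapIdx]
        rw [if_neg (by omega)]
        apply List.ext_getElem (by simp)
        intro i h1 h2
        rw [List.getElem_set]
        by_cases him : m = i
        · subst him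
          simp
        · simp only [if_neg him, List.getElem_mapIdx]
          by_cases hi : i < m
          · rw [if_pos hi, if_pos (by omega)]
          · rw [if_neg hi, if_neg (by omega)]
      · rw [List.set_eq_of_length_le (by simp; omega)]
        apply List.ext_getElem (by simp)
        intro i h1 h2
        have : i < g.length := by simpa using h1
        simp only [List.getElem_mapIdx]
        rw [if_pos (by omega), if_pos (by omega)]
    · rw [List.range_succ, List.map_append, List.sum_append]
      simp only [List.map_cons, List.map_nil, List.sum_cons, List.sum_nil, add_zero]
      ring

lemma outerU (seats : List (List String)) (v : Int → Int → String) (ind : Int → Int → Int) :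
    ∀ (k : Nat),
      (PySem.List.pyRange 0 (k : Int) 1).foldl (fun st x =>
          (PySem.List.pyRange 0 (pvH seats) 1).foldl (fun st y =>
            (st.1.set y.toNat ((st.1.getD y.toNat []).set x.toNat (v x y)), st.2 + ind x y)) st)
        (seats, (0 : Int))
      = (seats.mapIdx (fun yy row => row.mapIdx (fun xx c =>
            if xx < k then v (xx : Int) (yy : Int) else c)),
         ((List.range k).map (fun (xx : Nat) =>
            ((List.range seats.length).map (fun (yy : Nat) => ind (xx : Int) (yy : Int))).sum)).sum) := by
  intro k
  induction k with
  | zero =>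
    rw [show ((0 : Nat) : Int) = 0 from rfl, PySem.List.pyRange_one_eq_nil (le_refl 0)]
    simp only [List.foldl_nil, List.range_zero, List.map_nil, List.sum_nil]
    congr 1
    apply List.ext_getElem (by simp)
    intro i h1 h2
    simp only [List.getElem_mapIdx, Nat.not_lt_zero, if_false]
    apply List.ext_getElem (by simp)
    intro j j1 j2
    simp
  | succ m ih =>
    rw [show ((m + 1 : Nat) : Int) = (m : Int) + 1 by push_cast; ring,
        PySem.List.pyRange_one_succ_right (by positivity), List.foldl_append, ih]
    simp only [List.foldl_cons, List.foldl_nil]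
    have hh : pvH seats = ((seats.length : Nat) : Int) := rfl
    rw [hh, innerU v ind seats.length (m : Int)]
    rw [Prod.mk.injEq]
    constructor
    · apply List.ext_getElem (by simp)
      intro i h1 h2
      have hig : i < seats.length := by simpa using h2
      simp only [List.getElem_mapIdx]
      rw [if_pos hig]
      apply List.ext_getElem (by simp)
      intro j j1 j2
      simp only [Int.toNat_natCast, List.getElem_set, List.getElem_mapIdx]
      by_cases hjm : m = j
      · subst hjm
        simp
      · rw [if_neg hjm]
        by_cases hj : j < m
        · rw [if_pos hj, if_pos (by omega)]
        · rw [if_neg hj, if_neg (by omega)]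
    · rw [List.range_succ, List.map_append, List.sum_append]
      simp

lemma runA_closed (seats : List (List String)) :
    run_pass seats
      = (seats.mapIdx (fun yy row => row.mapIdx (fun xx c =>
            if xx < (seats.headD []).length then newCell seats (xx : Int) (yy : Int) else c)),
         ((List.range (seats.headD []).length).map (fun (xx : Nat) =>
            ((List.range seats.length).map (fun (yy : Nat) => pvInd seats (xx : Int) (yy : Int))).sum)).sum) := by
  have h1 : run_pass seats
      = (PySem.List.pyRange 0 (pvW seats) 1).foldl (fun st x =>
          (PySem.List.pyRange 0 (pvH seats) 1).foldl (fun st y =>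
            (st.1.set y.toNat ((st.1.getD y.toNat []).set x.toNat (newCell seats x y)),
             st.2 + pvInd seats x y)) st) (seats, (0 : Int)) := by
    unfold run_pass
    dsimp only
    congr 1
    funext st x
    congr 1
    funext st y
    exact stepA_eq seats x y st
  rw [h1, show pvW seats = (((seats.headD []).length : Nat) : Int) from rfl,
      outerU seats (newCell seats) (pvInd seats)]

lemma sum_swap_pv (f : Nat → Nat → Int) (w h : Nat) :
    ((List.range w).map (fun x => ((List.range h).map (fun y => f x y)).sum)).sum
      = ((List.range h).map (fun y => ((List.range w).map (fun x => f x y)).sum)).sum := by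
  rw [show ((List.range w).map (fun x => ((List.range h).map (fun y => f x y)).sum)).sum
        = ∑ x ∈ Finset.range w, ∑ y ∈ Finset.range h, f x y from rfl,
      show ((List.range h).map (fun y => ((List.range w).map (fun x => f x y)).sum)).sum
        = ∑ y ∈ Finset.range h, ∑ x ∈ Finset.range w, f x y from rfl]
  exact Finset.sum_comm

-- ---- B-side: table basics ----
def pvLk {α : Type} (d : α) (t : List (List α)) (x y : Int) : α :=
  (t.getD y.toNat []).getD x.toNat d

def pvShape {α : Type} (seats : List (List String)) (t : List (List α)) : Prop :=
  t.length = seats.length ∧ ∀ r ∈ t, r.length = (seats.headD []).length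

lemma getD_set_ne_pv {α : Type} (l : List α) (d : α) (n j : Nat) (h : j ≠ n) (v : α) :
    (l.set n v).getD j d = l.getD j d := by
  rcases lt_or_ge j l.length with hl | hl
  · rw [List.getD_eq_getElem _ _ (by simpa using hl), List.getD_eq_getElem _ _ hl,
      List.getElem_set_ne (by omega)]
  · rw [List.getD_eq_default _ _ (by simpa using hl), List.getD_eq_default _ _ hl]

lemma getD_set_self_pv {α : Type} (l : List α) (d : α) (n : Nat) (hn : n < l.length) (v : α) :
    (l.set n v).getD n d = v := by
  rw [List.getD_eq_getElem _ _ (by simpa using hn), List.getElem_set_self]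

lemma pvShape_set {α : Type} (seats : List (List String)) (t : List (List α))
    (hsh : pvShape seats t) (n m : Nat) (v : α) :
    pvShape seats (t.set n ((t.getD n []).set m v)) := by
  rcases lt_or_ge n t.length with hl | hl
  · refine ⟨by simpa using hsh.1, ?_⟩
    intro r hr
    rcases List.mem_or_eq_of_mem_set hr with hmem | rfl
    · exact hsh.2 r hmem
    · rw [List.length_set, List.getD_eq_getElem _ _ hl]
      exact hsh.2 _ (List.getElem_mem hl)
  · rw [List.set_eq_of_length_le hl]
    exact hsh

lemma lk_set_self {α : Type} (d : α) (t : List (List α)) (x y : Int) (v : α)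
    (hyl : y.toNat < t.length) (hxl : x.toNat < (t.getD y.toNat []).length) :
    pvLk d (t.set y.toNat ((t.getD y.toNat []).set x.toNat v)) x y = v := by
  unfold pvLk
  rw [getD_set_self_pv _ _ _ (by simpa using hyl),
      getD_set_self_pv _ _ _ (by simpa using hxl)]

lemma lk_set_ne {α : Type} (d : α) (t : List (List α)) (x y : Int) (v : α) (a b : Int)
    (hx : 0 ≤ x) (hy : 0 ≤ y) (ha : 0 ≤ a) (hb : 0 ≤ b) (hne : ¬(a = x ∧ b = y)) :
    pvLk d (t.set y.toNat ((t.getD y.toNat []).set x.toNat v)) a b = pvLk d t a b := by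
  unfold pvLk
  by_cases hyy : b.toNat = y.toNat
  · have hby : b = y := by omega
    have hax : a ≠ x := fun h => hne ⟨h, hby⟩
    rcases lt_or_ge y.toNat t.length with hl | hl
    · rw [hyy, getD_set_self_pv _ _ _ hl, getD_set_ne_pv _ _ _ _ (by omega)]
    · rw [List.set_eq_of_length_le hl]
  · rw [getD_set_ne_pv _ _ _ _ hyy]

lemma lk_replicate {α : Type} (d : α) (n m : Nat) (x y : Int) :
    pvLk d (List.replicate n (List.replicate m d)) x y = d := by
  unfold pvLk
  rcases lt_or_ge y.toNat n with hl | hl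
  · have h1 : (List.replicate n (List.replicate m d)).getD y.toNat [] = List.replicate m d := by
      rw [List.getD_eq_getElem _ _ (by simpa using hl), List.getElem_replicate]
    rw [h1]
    rcases lt_or_ge x.toNat m with hx | hx
    · rw [List.getD_eq_getElem _ _ (by simpa using hx), List.getElem_replicate]
    · rw [List.getD_eq_default _ _ (by simpa using hx)]
  · have h1 : (List.replicate n (List.replicate m d)).getD y.toNat [] = [] :=
      List.getD_eq_default _ _ (by simpa using hl)
    rw [h1]
    rfl

lemma pvShape_replicate {α : Type} (seats : List (List String)) (d : α) :
    pvShape seats (List.replicate (pvH seats).toNat (List.replicate (pvW seats).toNat d)) := by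
  constructor
  · simp [pvH]
  · intro r hr
    rw [List.eq_of_mem_replicate hr]
    simp [pvW]

-- ---- B-side: one sweep statement ----
lemma visStep_shape (seats : List (List String)) (dx dy : Int)
    (t : List (List (Option String))) (y x : Int) (hsh : pvShape seats t) :
    pvShape seats (visStep seats dx dy t y x) := by
  simp only [visStep]
  split
  · exact pvShape_set seats t hsh _ _ _
  · exact hsh

lemma visStep_frame (seats : List (List String)) (dx dy : Int)
    (t : List (List (Option String))) (y x a b : Int)
    (hx : 0 ≤ x) (hy : 0 ≤ y) (ha : 0 ≤ a) (hb : 0 ≤ b) (hne : ¬(a = x ∧ b = y)) :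
    pvLk none (visStep seats dx dy t y x) a b = pvLk none t a b := by
  simp only [visStep]
  split
  · exact lk_set_ne none t x y _ a b hx hy ha hb hne
  · rfl

lemma visStep_val (seats : List (List String)) (dx dy : Int)
    (t : List (List (Option String))) (y x : Int) (hsh : pvShape seats t)
    (hx : 0 ≤ x) (hxw : x < pvW seats) (hy : 0 ≤ y) (hyh : y < pvH seats) :
    pvLk none (visStep seats dx dy t y x) x y =
      if 0 ≤ x + dx ∧ x + dx < pvW seats ∧ 0 ≤ y + dy ∧ y + dy < pvH seats then
        (if PySem.Str.isIn (pvCell seats (x + dx) (y + dy)) "#L" then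
           some (pvCell seats (x + dx) (y + dy))
         else pvLk none t (x + dx) (y + dy))
      else pvLk none t x y := by
  simp only [visStep]
  have hyl : y.toNat < t.length := by
    rw [hsh.1]
    unfold pvH at hyh
    omega
  have hxl : x.toNat < (t.getD y.toNat []).length := by
    rw [List.getD_eq_getElem _ _ hyl, hsh.2 _ (List.getElem_mem hyl)]
    unfold pvW at hxw
    omega
  split
  · rw [lk_set_self none t x y _ hyl hxl]
    rfl
  · rfl

lemma visStep_correct (seats : List (List String)) (dx dy : Int) (hD : pvDirOk dx dy)
    (t : List (List (Option String))) (y x : Int) (hsh : pvShape seats t)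
    (hx : 0 ≤ x) (hxw : x < pvW seats) (hy : 0 ≤ y) (hyh : y < pvH seats)
    (hdep : (0 ≤ x + dx ∧ x + dx < pvW seats ∧ 0 ≤ y + dy ∧ y + dy < pvH seats) →
        ¬(PySem.Str.isIn (pvCell seats (x + dx) (y + dy)) "#L" = true) →
        pvLk none t (x + dx) (y + dy) = pvR seats (dx, dy) (x + dx) (y + dy))
    (hself : pvLk none t x y = none) :
    pvLk none (visStep seats dx dy t y x) x y = pvR seats (dx, dy) x y := by
  rw [visStep_val seats dx dy t y x hsh hx hxw hy hyh, R_rec seats dx dy hD x y]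
  by_cases hg : 0 ≤ x + dx ∧ x + dx < pvW seats ∧ 0 ≤ y + dy ∧ y + dy < pvH seats
  · rw [if_pos hg, if_pos hg]
    by_cases hs : PySem.Str.isIn (pvCell seats (x + dx) (y + dy)) "#L" = true
    · rw [if_pos hs, if_pos hs]
    · rw [if_neg hs, if_neg hs, hdep hg hs]
  · rw [if_neg hg, if_neg hg, hself]

-- ---- B-side: one row of a sweep whose direction leaves the row (dy ≠ 0) ----
lemma sweepRow_ne (seats : List (List String)) (dx dy : Int) (hD : pvDirOk dx dy)
    (hdy : dy ≠ 0) (y : Int) (hy0 : 0 ≤ y) (hyh : y < pvH seats) :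
    ∀ (xs : List Int) (t : List (List (Option String))),
      pvShape seats t → xs.Nodup → (∀ x ∈ xs, 0 ≤ x ∧ x < pvW seats) →
      (∀ a, 0 ≤ a → a < pvW seats → 0 ≤ y + dy → y + dy < pvH seats →
          pvLk none t a (y + dy) = pvR seats (dx, dy) a (y + dy)) →
      (∀ x ∈ xs, pvLk none t x y = none) →
      (pvShape seats (xs.foldl (fun t x => visStep seats dx dy t y x) t) ∧
       (∀ a b, 0 ≤ a → 0 ≤ b → b ≠ y →
          pvLk none (xs.foldl (fun t x => visStep seats dx dy t y x) t) a b = pvLk none t a b) ∧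
       (∀ x ∈ xs,
          pvLk none (xs.foldl (fun t x => visStep seats dx dy t y x) t) x y
            = pvR seats (dx, dy) x y) ∧
       (∀ a, 0 ≤ a → a ∉ xs →
          pvLk none (xs.foldl (fun t x => visStep seats dx dy t y x) t) a y = pvLk none t a y)) := by
  intro xs
  induction xs with
  | nil =>
    intro t hsh _ _ _ _
    exact ⟨hsh, fun _ _ _ _ _ => rfl, by simp, fun _ _ _ => rfl⟩
  | cons x xs ih =>
    intro t hsh hnd hxr hdep hnone
    have hx : 0 ≤ x ∧ x < pvW seats := hxr x List.mem_cons_self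
    have hx1 : pvLk none (visStep seats dx dy t y x) x y = pvR seats (dx, dy) x y := by
      refine visStep_correct seats dx dy hD t y x hsh hx.1 hx.2 hy0 hyh ?_
        (hnone x List.mem_cons_self)
      intro hg _
      exact hdep (x + dx) hg.1 hg.2.1 hg.2.2.1 hg.2.2.2
    have hsh1 : pvShape seats (visStep seats dx dy t y x) :=
      visStep_shape seats dx dy t y x hsh
    have hframe1 : ∀ a b, 0 ≤ a → 0 ≤ b → b ≠ y →
        pvLk none (visStep seats dx dy t y x) a b = pvLk none t a b := by
      intro a b ha hb hby
      exact visStep_frame seats dx dy t y x a b hx.1 hy0 ha hb (fun h => hby h.2)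
    have hrow1 : ∀ a, 0 ≤ a → a ≠ x →
        pvLk none (visStep seats dx dy t y x) a y = pvLk none t a y := by
      intro a ha hax
      exact visStep_frame seats dx dy t y x a y hx.1 hy0 ha hy0 (fun h => hax h.1)
    obtain ⟨ih1, ih2, ih3, ih4⟩ := ih (visStep seats dx dy t y x) hsh1
      (List.Nodup.of_cons hnd) (fun a ha => hxr a (List.mem_cons_of_mem x ha))
      (by
        intro a ha haw hd1 hd2
        rw [hframe1 a (y + dy) ha hd1 (by omega)]
        exact hdep a ha haw hd1 hd2)
      (by
        intro a ha
        rw [hrow1 a (hxr a (List.mem_cons_of_mem x ha)).1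
          (fun he => (List.nodup_cons.mp hnd).1 (he ▸ ha))]
        exact hnone a (List.mem_cons_of_mem x ha))
    rw [List.foldl_cons]
    refine ⟨ih1, ?_, ?_, ?_⟩
    · intro a b ha hb hby
      rw [ih2 a b ha hb hby, hframe1 a b ha hb hby]
    · intro x' hx'
      rcases List.mem_cons.mp hx' with rfl | hmem
      · rw [ih4 x' hx.1 (List.nodup_cons.mp hnd).1, hx1]
      · exact ih3 x' hmem
    · intro a ha hamem
      rw [ih4 a ha (fun h => hamem (List.mem_cons_of_mem x h)),
          hrow1 a ha (fun he => hamem (he ▸ List.mem_cons_self))]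

-- ---- B-side: one row of the horizontal sweeps (dy = 0): a scan along the row ----
lemma scanRow_left (seats : List (List String)) (y : Int) (hy0 : 0 ≤ y) (hyh : y < pvH seats)
    (t : List (List (Option String))) (hsh : pvShape seats t)
    (hnone : ∀ a, 0 ≤ a → a < pvW seats → pvLk none t a y = none) :
    ∀ m : Nat, (m : Int) ≤ pvW seats →
      (pvShape seats ((PySem.List.pyRange 0 (m : Int) 1).foldl
          (fun t x => visStep seats (-1) 0 t y x) t) ∧
       (∀ a b, 0 ≤ a → 0 ≤ b → b ≠ y →
          pvLk none ((PySem.List.pyRange 0 (m : Int) 1).foldl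
            (fun t x => visStep seats (-1) 0 t y x) t) a b = pvLk none t a b) ∧
       (∀ a, 0 ≤ a → a < (m : Int) →
          pvLk none ((PySem.List.pyRange 0 (m : Int) 1).foldl
            (fun t x => visStep seats (-1) 0 t y x) t) a y = pvR seats (-1, 0) a y) ∧
       (∀ a, (m : Int) ≤ a →
          pvLk none ((PySem.List.pyRange 0 (m : Int) 1).foldl
            (fun t x => visStep seats (-1) 0 t y x) t) a y = pvLk none t a y)) := by
  intro m
  induction m with
  | zero =>
    intro _
    rw [show ((0 : Nat) : Int) = 0 from rfl, PySem.List.pyRange_one_eq_nil (le_refl 0)]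
    exact ⟨hsh, fun _ _ _ _ _ => rfl, by intro a _ h2; omega, fun _ _ => rfl⟩
  | succ m ih =>
    intro hm
    obtain ⟨ih1, ih2, ih3, ih4⟩ := ih (by push_cast at hm ⊢; omega)
    rw [show ((m + 1 : Nat) : Int) = (m : Int) + 1 by push_cast; ring,
        PySem.List.pyRange_one_succ_right (by positivity), List.foldl_append]
    simp only [List.foldl_cons, List.foldl_nil]
    have hmw : (m : Int) < pvW seats := by push_cast at hm; omega
    have hcorr : pvLk none (visStep seats (-1) 0 ((PySem.List.pyRange 0 (m : Int) 1).foldl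
        (fun t x => visStep seats (-1) 0 t y x) t) y (m : Int)) (m : Int) y
        = pvR seats (-1, 0) (m : Int) y := by
      refine visStep_correct seats (-1) 0 (by norm_num [pvDirOk]) _ y (m : Int) ih1
        (by positivity) hmw hy0 hyh ?_ ?_
      · intro hg _
        have := ih3 ((m : Int) + -1) hg.1 (by omega)
        simpa using this
      · rw [ih4 (m : Int) (le_refl _)]
        exact hnone (m : Int) (by positivity) hmw
    refine ⟨visStep_shape seats (-1) 0 _ y (m : Int) ih1, ?_, ?_, ?_⟩
    · intro a b ha hb hby
      rw [visStep_frame seats (-1) 0 _ y (m : Int) a b (by positivity) hy0 ha hb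
        (fun h => hby h.2), ih2 a b ha hb hby]
    · intro a ha ham
      rcases eq_or_lt_of_le (show a ≤ (m : Int) by omega) with rfl | hlt
      · exact hcorr
      · rw [visStep_frame seats (-1) 0 _ y (m : Int) a y (by positivity) hy0 ha hy0
          (fun h => by omega), ih3 a ha (by omega)]
    · intro a ha
      rw [visStep_frame seats (-1) 0 _ y (m : Int) a y (by positivity) hy0 (by omega) hy0
        (fun h => by omega), ih4 a (by omega)]

lemma scanRow_right (seats : List (List String)) (y : Int) (hy0 : 0 ≤ y) (hyh : y < pvH seats)
    (t : List (List (Option String))) (hsh : pvShape seats t)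
    (hnone : ∀ a, 0 ≤ a → a < pvW seats → pvLk none t a y = none) :
    ∀ m : Nat, (m : Int) ≤ pvW seats →
      (pvShape seats (((PySem.List.pyRange (pvW seats - (m : Int)) (pvW seats) 1).reverse).foldl
          (fun t x => visStep seats 1 0 t y x) t) ∧
       (∀ a b, 0 ≤ a → 0 ≤ b → b ≠ y →
          pvLk none (((PySem.List.pyRange (pvW seats - (m : Int)) (pvW seats) 1).reverse).foldl
            (fun t x => visStep seats 1 0 t y x) t) a b = pvLk none t a b) ∧
       (∀ a, pvW seats - (m : Int) ≤ a → a < pvW seats →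
          pvLk none (((PySem.List.pyRange (pvW seats - (m : Int)) (pvW seats) 1).reverse).foldl
            (fun t x => visStep seats 1 0 t y x) t) a y = pvR seats (1, 0) a y) ∧
       (∀ a, 0 ≤ a → a < pvW seats - (m : Int) →
          pvLk none (((PySem.List.pyRange (pvW seats - (m : Int)) (pvW seats) 1).reverse).foldl
            (fun t x => visStep seats 1 0 t y x) t) a y = pvLk none t a y)) := by
  intro m
  induction m with
  | zero =>
    intro _
    rw [show pvW seats - ((0 : Nat) : Int) = pvW seats by push_cast; ring,
        PySem.List.pyRange_one_eq_nil (le_refl _)]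
    exact ⟨hsh, fun _ _ _ _ _ => rfl, by intro a h1 h2; omega, fun _ _ _ => rfl⟩
  | succ m ih =>
    intro hm
    obtain ⟨ih1, ih2, ih3, ih4⟩ := ih (by push_cast at hm ⊢; omega)
    set u := pvW seats - (m : Int) - 1 with hu
    have hu0 : 0 ≤ u := by push_cast at hm; omega
    have huw : u < pvW seats := by push_cast at hm; omega
    have hsplit : (PySem.List.pyRange (pvW seats - ((m + 1 : Nat) : Int)) (pvW seats) 1).reverse
        = (PySem.List.pyRange (pvW seats - (m : Int)) (pvW seats) 1).reverse ++ [u] := by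
      rw [show pvW seats - ((m + 1 : Nat) : Int) = u by rw [hu]; push_cast; ring,
          show pvW seats - (m : Int) = u + 1 by rw [hu]; ring,
          PySem.List.pyRange_one_append u (u + 1) (pvW seats) (by omega) (by omega),
          PySem.List.pyRange_one_singleton, List.reverse_append]
      simp
    rw [hsplit, List.foldl_append]
    simp only [List.foldl_cons, List.foldl_nil]
    have hcorr : pvLk none (visStep seats 1 0 (((PySem.List.pyRange (pvW seats - (m : Int))
        (pvW seats) 1).reverse).foldl (fun t x => visStep seats 1 0 t y x) t) y u) u y
        = pvR seats (1, 0) u y := by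
      refine visStep_correct seats 1 0 (by norm_num [pvDirOk]) _ y u ih1 hu0 huw hy0 hyh ?_ ?_
      · intro hg _
        have := ih3 (u + 1) (by omega) hg.2.1
        simpa using this
      · rw [ih4 u hu0 (by omega)]
        exact hnone u hu0 huw
    refine ⟨visStep_shape seats 1 0 _ y u ih1, ?_, ?_, ?_⟩
    · intro a b ha hb hby
      rw [visStep_frame seats 1 0 _ y u a b hu0 hy0 ha hb (fun h => hby h.2), ih2 a b ha hb hby]
    · intro a ha haw
      rcases eq_or_lt_of_le (show u ≤ a by omega) with rfl | hlt
      · exact hcorr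
      · rw [visStep_frame seats 1 0 _ y u a y hu0 hy0 (by omega) hy0 (fun h => by omega),
          ih3 a (by omega) haw]
    · intro a ha0 ha
      rw [visStep_frame seats 1 0 _ y u a y hu0 hy0 ha0 hy0 (fun h => by omega),
        ih4 a ha0 (by omega)]

-- ---- B-side: whole-grid sweeps, one lemma per processing order ----
lemma outer_up (seats : List (List String)) (dx : Int) (hD : pvDirOk dx (-1))
    (xs : List Int) (hnd : xs.Nodup) (hbd : ∀ x ∈ xs, 0 ≤ x ∧ x < pvW seats)
    (hcp : ∀ a, 0 ≤ a → a < pvW seats → a ∈ xs)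
    (t0 : List (List (Option String))) (hsh0 : pvShape seats t0)
    (hn0 : ∀ a b, 0 ≤ a → 0 ≤ b → pvLk none t0 a b = none) :
    ∀ m : Nat, (m : Int) ≤ pvH seats →
      (pvShape seats ((PySem.List.pyRange 0 (m : Int) 1).foldl
          (fun t y => xs.foldl (fun t x => visStep seats dx (-1) t y x) t) t0) ∧
       (∀ a b, 0 ≤ a → a < pvW seats → 0 ≤ b → b < pvH seats →
          pvLk none ((PySem.List.pyRange 0 (m : Int) 1).foldl
            (fun t y => xs.foldl (fun t x => visStep seats dx (-1) t y x) t) t0) a b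
          = if b < (m : Int) then pvR seats (dx, -1) a b else none)) := by
  intro m
  induction m with
  | zero =>
    intro _
    rw [show ((0 : Nat) : Int) = 0 from rfl, PySem.List.pyRange_one_eq_nil (le_refl 0)]
    refine ⟨hsh0, ?_⟩
    intro a b ha haw hb hbh
    rw [if_neg (by omega)]
    exact hn0 a b ha hb
  | succ m ih =>
    intro hm
    obtain ⟨ih1, ih2⟩ := ih (by push_cast at hm ⊢; omega)
    rw [show ((m + 1 : Nat) : Int) = (m : Int) + 1 by push_cast; ring,
        PySem.List.pyRange_one_succ_right (by positivity), List.foldl_append]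
    simp only [List.foldl_cons, List.foldl_nil]
    have hmh : (m : Int) < pvH seats := by push_cast at hm; omega
    obtain ⟨s1, s2, s3, s4⟩ := sweepRow_ne seats dx (-1) hD (by omega) (m : Int)
      (by positivity) hmh xs _ ih1 hnd hbd
      (by
        intro a ha haw hd1 hd2
        rw [ih2 a ((m : Int) + -1) ha haw hd1 hd2, if_pos (by omega)])
      (by
        intro x hxmem
        rw [ih2 x (m : Int) (hbd x hxmem).1 (hbd x hxmem).2 (by positivity) hmh,
          if_neg (by omega)])
    refine ⟨s1, ?_⟩
    intro a b ha haw hb hbh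
    by_cases hbm : b = (m : Int)
    · subst hbm
      rw [if_pos (by omega)]
      exact s3 a (hcp a ha haw)
    · rw [s2 a b ha hb hbm, ih2 a b ha haw hb hbh]
      by_cases hlt : b < (m : Int)
      · rw [if_pos hlt, if_pos (by omega)]
      · rw [if_neg hlt, if_neg (by omega)]

lemma outer_down (seats : List (List String)) (dx : Int) (hD : pvDirOk dx 1)
    (xs : List Int) (hnd : xs.Nodup) (hbd : ∀ x ∈ xs, 0 ≤ x ∧ x < pvW seats)
    (hcp : ∀ a, 0 ≤ a → a < pvW seats → a ∈ xs)
    (t0 : List (List (Option String))) (hsh0 : pvShape seats t0)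
    (hn0 : ∀ a b, 0 ≤ a → 0 ≤ b → pvLk none t0 a b = none) :
    ∀ m : Nat, (m : Int) ≤ pvH seats →
      (pvShape seats (((PySem.List.pyRange (pvH seats - (m : Int)) (pvH seats) 1).reverse).foldl
          (fun t y => xs.foldl (fun t x => visStep seats dx 1 t y x) t) t0) ∧
       (∀ a b, 0 ≤ a → a < pvW seats → 0 ≤ b → b < pvH seats →
          pvLk none (((PySem.List.pyRange (pvH seats - (m : Int)) (pvH seats) 1).reverse).foldl
            (fun t y => xs.foldl (fun t x => visStep seats dx 1 t y x) t) t0) a b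
          = if pvH seats - (m : Int) ≤ b then pvR seats (dx, 1) a b else none)) := by
  intro m
  induction m with
  | zero =>
    intro _
    rw [show pvH seats - ((0 : Nat) : Int) = pvH seats by push_cast; ring,
        PySem.List.pyRange_one_eq_nil (le_refl _)]
    refine ⟨hsh0, ?_⟩
    intro a b ha haw hb hbh
    rw [if_neg (by omega)]
    exact hn0 a b ha hb
  | succ m ih =>
    intro hm
    obtain ⟨ih1, ih2⟩ := ih (by push_cast at hm ⊢; omega)
    set u := pvH seats - (m : Int) - 1 with hu
    have hu0 : 0 ≤ u := by push_cast at hm; omega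
    have huh : u < pvH seats := by push_cast at hm; omega
    have hsplit : (PySem.List.pyRange (pvH seats - ((m + 1 : Nat) : Int)) (pvH seats) 1).reverse
        = (PySem.List.pyRange (pvH seats - (m : Int)) (pvH seats) 1).reverse ++ [u] := by
      rw [show pvH seats - ((m + 1 : Nat) : Int) = u by rw [hu]; push_cast; ring,
          show pvH seats - (m : Int) = u + 1 by rw [hu]; ring,
          PySem.List.pyRange_one_append u (u + 1) (pvH seats) (by omega) (by omega),
          PySem.List.pyRange_one_singleton, List.reverse_append]
      simp
    rw [hsplit, List.foldl_append]
    simp only [List.foldl_cons, List.foldl_nil]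
    obtain ⟨s1, s2, s3, s4⟩ := sweepRow_ne seats dx 1 hD (by omega) u hu0 huh xs _ ih1 hnd hbd
      (by
        intro a ha haw hd1 hd2
        rw [ih2 a (u + 1) ha haw hd1 hd2, if_pos (by omega)])
      (by
        intro x hxmem
        rw [ih2 x u (hbd x hxmem).1 (hbd x hxmem).2 hu0 huh, if_neg (by omega)])
    refine ⟨s1, ?_⟩
    intro a b ha haw hb hbh
    by_cases hbu : b = u
    · subst hbu
      rw [if_pos (by omega)]
      exact s3 a (hcp a ha haw)
    · rw [s2 a b ha hb hbu, ih2 a b ha haw hb hbh,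
        show pvH seats - ((m + 1 : Nat) : Int) = u by rw [hu]; push_cast; ring]
      by_cases hle : u + 1 ≤ b
      · rw [if_pos (by omega), if_pos (by omega)]
      · rw [if_neg (by omega), if_neg (by omega)]

lemma outer_scan_right (seats : List (List String))
    (t0 : List (List (Option String))) (hsh0 : pvShape seats t0)
    (hn0 : ∀ a b, 0 ≤ a → 0 ≤ b → pvLk none t0 a b = none) :
    ∀ m : Nat, (m : Int) ≤ pvH seats →
      (pvShape seats ((PySem.List.pyRange 0 (m : Int) 1).foldl
          (fun t y => ((PySem.List.pyRange 0 (pvW seats) 1).reverse).foldl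
            (fun t x => visStep seats 1 0 t y x) t) t0) ∧
       (∀ a b, 0 ≤ a → a < pvW seats → 0 ≤ b → b < pvH seats →
          pvLk none ((PySem.List.pyRange 0 (m : Int) 1).foldl
            (fun t y => ((PySem.List.pyRange 0 (pvW seats) 1).reverse).foldl
              (fun t x => visStep seats 1 0 t y x) t) t0) a b
          = if b < (m : Int) then pvR seats (1, 0) a b else none)) := by
  intro m
  induction m with
  | zero =>
    intro _
    rw [show ((0 : Nat) : Int) = 0 from rfl, PySem.List.pyRange_one_eq_nil (le_refl 0)]
    refine ⟨hsh0, ?_⟩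
    intro a b ha haw hb hbh
    rw [if_neg (show ¬ (b < (0 : Int)) by omega)]
    exact hn0 a b ha hb
  | succ m ih =>
    intro hm
    obtain ⟨ih1, ih2⟩ := ih (by push_cast at hm ⊢; omega)
    rw [show ((m + 1 : Nat) : Int) = (m : Int) + 1 by push_cast; ring,
        PySem.List.pyRange_one_succ_right (by positivity), List.foldl_append]
    simp only [List.foldl_cons, List.foldl_nil]
    have hmh : (m : Int) < pvH seats := by push_cast at hm; omega
    have hnrow : ∀ a, 0 ≤ a → a < pvW seats →
        pvLk none ((PySem.List.pyRange 0 (m : Int) 1).foldl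
          (fun t y => ((PySem.List.pyRange 0 (pvW seats) 1).reverse).foldl
            (fun t x => visStep seats 1 0 t y x) t) t0) a (m : Int) = none := by
      intro a ha haw
      rw [ih2 a (m : Int) ha haw (by positivity) hmh,
        if_neg (show ¬ ((m : Int) < (m : Int)) by omega)]
    have hWnat : pvW seats = (((seats.headD []).length : Nat) : Int) := rfl
    have hzero : pvW seats - (((seats.headD []).length : Nat) : Int) = 0 := by
      rw [← hWnat]; ring
    obtain ⟨s1, s2, s3, s4⟩ := scanRow_right seats (m : Int) (by positivity) hmh _ ih1 hnrow
      (seats.headD []).length (by rw [hWnat])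
    rw [hzero] at s1 s2 s3 s4
    refine ⟨s1, ?_⟩
    intro a b ha haw hb hbh
    by_cases hbm : b = (m : Int)
    · subst hbm
      rw [if_pos (by omega)]
      exact s3 a (by omega) haw
    · rw [s2 a b ha hb hbm, ih2 a b ha haw hb hbh]
      by_cases hlt : b < (m : Int)
      · rw [if_pos hlt, if_pos (by omega)]
      · rw [if_neg hlt, if_neg (by omega)]

lemma outer_scan_left (seats : List (List String))
    (t0 : List (List (Option String))) (hsh0 : pvShape seats t0)
    (hn0 : ∀ a b, 0 ≤ a → 0 ≤ b → pvLk none t0 a b = none) :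
    ∀ m : Nat, (m : Int) ≤ pvH seats →
      (pvShape seats ((PySem.List.pyRange 0 (m : Int) 1).foldl
          (fun t y => (PySem.List.pyRange 0 (pvW seats) 1).foldl
            (fun t x => visStep seats (-1) 0 t y x) t) t0) ∧
       (∀ a b, 0 ≤ a → a < pvW seats → 0 ≤ b → b < pvH seats →
          pvLk none ((PySem.List.pyRange 0 (m : Int) 1).foldl
            (fun t y => (PySem.List.pyRange 0 (pvW seats) 1).foldl
              (fun t x => visStep seats (-1) 0 t y x) t) t0) a b
          = if b < (m : Int) then pvR seats (-1, 0) a b else none)) := by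
  intro m
  induction m with
  | zero =>
    intro _
    rw [show ((0 : Nat) : Int) = 0 from rfl, PySem.List.pyRange_one_eq_nil (le_refl 0)]
    refine ⟨hsh0, ?_⟩
    intro a b ha haw hb hbh
    rw [if_neg (show ¬ (b < (0 : Int)) by omega)]
    exact hn0 a b ha hb
  | succ m ih =>
    intro hm
    obtain ⟨ih1, ih2⟩ := ih (by push_cast at hm ⊢; omega)
    rw [show ((m + 1 : Nat) : Int) = (m : Int) + 1 by push_cast; ring,
        PySem.List.pyRange_one_succ_right (by positivity), List.foldl_append]
    simp only [List.foldl_cons, List.foldl_nil]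
    have hmh : (m : Int) < pvH seats := by push_cast at hm; omega
    have hnrow : ∀ a, 0 ≤ a → a < pvW seats →
        pvLk none ((PySem.List.pyRange 0 (m : Int) 1).foldl
          (fun t y => (PySem.List.pyRange 0 (pvW seats) 1).foldl
            (fun t x => visStep seats (-1) 0 t y x) t) t0) a (m : Int) = none := by
      intro a ha haw
      rw [ih2 a (m : Int) ha haw (by positivity) hmh,
        if_neg (show ¬ ((m : Int) < (m : Int)) by omega)]
    have hWnat : pvW seats = (((seats.headD []).length : Nat) : Int) := rfl
    obtain ⟨s1, s2, s3, s4⟩ := scanRow_left seats (m : Int) (by positivity) hmh _ ih1 hnrow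
      (seats.headD []).length (by rw [hWnat])
    rw [← hWnat] at s1 s2 s3 s4
    refine ⟨s1, ?_⟩
    intro a b ha haw hb hbh
    by_cases hbm : b = (m : Int)
    · subst hbm
      rw [if_pos (by omega)]
      exact s3 a ha haw
    · rw [s2 a b ha hb hbm, ih2 a b ha haw hb hbh]
      by_cases hlt : b < (m : Int)
      · rw [if_pos hlt, if_pos (by omega)]
      · rw [if_neg hlt, if_neg (by omega)]

-- ---- B-side: the built visibility table is the ray function, for each direction ----
def pvVis (seats : List (List String)) (d : Int × Int) : List (List (Option String)) :=
  (if d.2 > 0 then (PySem.List.pyRange 0 (pvH seats) 1).reverse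
   else PySem.List.pyRange 0 (pvH seats) 1).foldl
    (fun t y =>
      (if d.1 > 0 then (PySem.List.pyRange 0 (pvW seats) 1).reverse
       else PySem.List.pyRange 0 (pvW seats) 1).foldl
        (fun t x => visStep seats d.1 d.2 t y x) t)
    (List.replicate (pvH seats).toNat (List.replicate (pvW seats).toNat (none : Option String)))

lemma xs_props (seats : List (List String)) (xs : List Int)
    (hxs : xs = (PySem.List.pyRange 0 (pvW seats) 1).reverse
           ∨ xs = PySem.List.pyRange 0 (pvW seats) 1) :
    xs.Nodup ∧ (∀ x ∈ xs, 0 ≤ x ∧ x < pvW seats) ∧ (∀ a, 0 ≤ a → a < pvW seats → a ∈ xs) := by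
  rcases hxs with rfl | rfl
  · refine ⟨List.nodup_reverse.mpr (PySem.List.nodup_pyRange_one 0 (pvW seats)), ?_, ?_⟩
    · intro x hx
      rw [List.mem_reverse, PySem.List.mem_pyRange_one] at hx
      exact hx
    · intro a h1 h2
      rw [List.mem_reverse, PySem.List.mem_pyRange_one]
      exact ⟨h1, h2⟩
  · refine ⟨PySem.List.nodup_pyRange_one 0 (pvW seats), ?_, ?_⟩
    · intro x hx
      rw [PySem.List.mem_pyRange_one] at hx
      exact hx
    · intro a h1 h2
      rw [PySem.List.mem_pyRange_one]
      exact ⟨h1, h2⟩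

lemma vis_correct (seats : List (List String)) (d : Int × Int) (hd : d ∈ pvDirs) :
    ∀ a b, 0 ≤ a → a < pvW seats → 0 ≤ b → b < pvH seats →
      pvLk none (pvVis seats d) a b = pvR seats d a b := by
  have hsh0 := pvShape_replicate seats (none : Option String)
  have hn0 : ∀ a b : Int, 0 ≤ a → 0 ≤ b →
      pvLk (none : Option String) (List.replicate (pvH seats).toNat
        (List.replicate (pvW seats).toNat none)) a b = none :=
    fun a b _ _ => lk_replicate none _ _ a b
  have hH : pvH seats = ((seats.length : Nat) : Int) := rfl
  have hzero : pvH seats - ((seats.length : Nat) : Int) = 0 := by rw [← hH]; ring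
  have hysA : (if (1 : Int) > 0 then (PySem.List.pyRange 0 (pvH seats) 1).reverse
      else PySem.List.pyRange 0 (pvH seats) 1) = (PySem.List.pyRange 0 (pvH seats) 1).reverse :=
    if_pos (by norm_num)
  have hysB : (if (0 : Int) > 0 then (PySem.List.pyRange 0 (pvH seats) 1).reverse
      else PySem.List.pyRange 0 (pvH seats) 1) = PySem.List.pyRange 0 (pvH seats) 1 :=
    if_neg (by norm_num)
  have hysC : (if (-1 : Int) > 0 then (PySem.List.pyRange 0 (pvH seats) 1).reverse
      else PySem.List.pyRange 0 (pvH seats) 1) = PySem.List.pyRange 0 (pvH seats) 1 :=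
    if_neg (by norm_num)
  have hxsA : (if (1 : Int) > 0 then (PySem.List.pyRange 0 (pvW seats) 1).reverse
      else PySem.List.pyRange 0 (pvW seats) 1) = (PySem.List.pyRange 0 (pvW seats) 1).reverse :=
    if_pos (by norm_num)
  have hxsB : (if (0 : Int) > 0 then (PySem.List.pyRange 0 (pvW seats) 1).reverse
      else PySem.List.pyRange 0 (pvW seats) 1) = PySem.List.pyRange 0 (pvW seats) 1 :=
    if_neg (by norm_num)
  have hxsC : (if (-1 : Int) > 0 then (PySem.List.pyRange 0 (pvW seats) 1).reverse
      else PySem.List.pyRange 0 (pvW seats) 1) = PySem.List.pyRange 0 (pvW seats) 1 :=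
    if_neg (by norm_num)
  intro a b ha haw hb hbh
  have hbH : b < ((seats.length : Nat) : Int) := by rw [← hH]; exact hbh
  simp only [pvDirs, List.mem_cons, List.not_mem_nil, or_false] at hd
  rcases hd with rfl | rfl | rfl | rfl | rfl | rfl | rfl | rfl <;> simp only [pvVis]
  · -- (1,0)
    simp only [hysB, hxsA]
    have h := (outer_scan_right seats _ hsh0 hn0 seats.length (by rw [hH])).2 a b ha haw hb hbh
    rw [if_pos hbH] at h
    exact h
  · -- (1,1)
    simp only [hysA, hxsA]
    obtain ⟨nd, bd, cp⟩ := xs_props seats ((PySem.List.pyRange 0 (pvW seats) 1).reverse) (Or.inl rfl)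
    have h := (outer_down seats 1 (by norm_num [pvDirOk]) _ nd bd cp _ hsh0 hn0
      seats.length (by rw [hH])).2 a b ha haw hb hbh
    rw [hzero, if_pos hb] at h
    exact h
  · -- (0,1)
    simp only [hysA, hxsB]
    obtain ⟨nd, bd, cp⟩ := xs_props seats (PySem.List.pyRange 0 (pvW seats) 1) (Or.inr rfl)
    have h := (outer_down seats 0 (by norm_num [pvDirOk]) _ nd bd cp _ hsh0 hn0
      seats.length (by rw [hH])).2 a b ha haw hb hbh
    rw [hzero, if_pos hb] at h
    exact h
  · -- (-1,1)
    simp only [hysA, hxsC]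
    obtain ⟨nd, bd, cp⟩ := xs_props seats (PySem.List.pyRange 0 (pvW seats) 1) (Or.inr rfl)
    have h := (outer_down seats (-1) (by norm_num [pvDirOk]) _ nd bd cp _ hsh0 hn0
      seats.length (by rw [hH])).2 a b ha haw hb hbh
    rw [hzero, if_pos hb] at h
    exact h
  · -- (-1,0)
    simp only [hysB, hxsC]
    have h := (outer_scan_left seats _ hsh0 hn0 seats.length (by rw [hH])).2 a b ha haw hb hbh
    rw [if_pos hbH] at h
    exact h
  · -- (-1,-1)
    simp only [hysC, hxsC]
    obtain ⟨nd, bd, cp⟩ := xs_props seats (PySem.List.pyRange 0 (pvW seats) 1) (Or.inr rfl)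
    have h := (outer_up seats (-1) (by norm_num [pvDirOk]) _ nd bd cp _ hsh0 hn0
      seats.length (by rw [hH])).2 a b ha haw hb hbh
    rw [if_pos hbH] at h
    exact h
  · -- (0,-1)
    simp only [hysC, hxsB]
    obtain ⟨nd, bd, cp⟩ := xs_props seats (PySem.List.pyRange 0 (pvW seats) 1) (Or.inr rfl)
    have h := (outer_up seats 0 (by norm_num [pvDirOk]) _ nd bd cp _ hsh0 hn0
      seats.length (by rw [hH])).2 a b ha haw hb hbh
    rw [if_pos hbH] at h
    exact h
  · -- (1,-1)
    simp only [hysC, hxsA]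
    obtain ⟨nd, bd, cp⟩ := xs_props seats ((PySem.List.pyRange 0 (pvW seats) 1).reverse) (Or.inl rfl)
    have h := (outer_up seats 1 (by norm_num [pvDirOk]) _ nd bd cp _ hsh0 hn0
      seats.length (by rw [hH])).2 a b ha haw hb hbh
    rw [if_pos hbH] at h
    exact h

-- ---- B-side: the per-direction counting pass ----
def pvCap (seats : List (List String)) (v : List (List (Option String)))
    (cnt : List (List Int)) : List (List Int) :=
  (PySem.List.pyRange 0 (pvH seats) 1).foldl (fun cnt y =>
    (PySem.List.pyRange 0 (pvW seats) 1).foldl (fun cnt x =>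
      if (v.getD y.toNat []).getD x.toNat none == some "#" then
        cnt.set y.toNat ((cnt.getD y.toNat []).set x.toNat
          (((cnt.getD y.toNat []).getD x.toNat 0) + 1))
      else cnt) cnt) cnt

lemma capRow (seats : List (List String)) (v : List (List (Option String)))
    (y : Int) (hy0 : 0 ≤ y) (hyh : y < pvH seats) :
    ∀ (m : Nat), (m : Int) ≤ pvW seats → ∀ cnt : List (List Int), pvShape seats cnt →
      (pvShape seats ((PySem.List.pyRange 0 (m : Int) 1).foldl (fun cnt x =>
          if (v.getD y.toNat []).getD x.toNat none == some "#" then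
            cnt.set y.toNat ((cnt.getD y.toNat []).set x.toNat
              (((cnt.getD y.toNat []).getD x.toNat 0) + 1))
          else cnt) cnt) ∧
       (∀ a b, 0 ≤ a → 0 ≤ b → b ≠ y →
          pvLk 0 ((PySem.List.pyRange 0 (m : Int) 1).foldl (fun cnt x =>
            if (v.getD y.toNat []).getD x.toNat none == some "#" then
              cnt.set y.toNat ((cnt.getD y.toNat []).set x.toNat
                (((cnt.getD y.toNat []).getD x.toNat 0) + 1))
            else cnt) cnt) a b = pvLk 0 cnt a b) ∧
       (∀ a, 0 ≤ a → a < (m : Int) →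
          pvLk 0 ((PySem.List.pyRange 0 (m : Int) 1).foldl (fun cnt x =>
            if (v.getD y.toNat []).getD x.toNat none == some "#" then
              cnt.set y.toNat ((cnt.getD y.toNat []).set x.toNat
                (((cnt.getD y.toNat []).getD x.toNat 0) + 1))
            else cnt) cnt) a y
          = pvLk 0 cnt a y + (if pvLk none v a y == some "#" then 1 else 0)) ∧
       (∀ a, (m : Int) ≤ a →
          pvLk 0 ((PySem.List.pyRange 0 (m : Int) 1).foldl (fun cnt x =>
            if (v.getD y.toNat []).getD x.toNat none == some "#" then
              cnt.set y.toNat ((cnt.getD y.toNat []).set x.toNat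
                (((cnt.getD y.toNat []).getD x.toNat 0) + 1))
            else cnt) cnt) a y = pvLk 0 cnt a y)) := by
  intro m
  induction m with
  | zero =>
    intro _ cnt hsh
    rw [show ((0 : Nat) : Int) = 0 from rfl, PySem.List.pyRange_one_eq_nil (le_refl 0)]
    exact ⟨hsh, fun _ _ _ _ _ => rfl, by intro a _ h2; omega, fun _ _ => rfl⟩
  | succ m ih =>
    intro hm cnt hsh
    obtain ⟨ih1, ih2, ih3, ih4⟩ := ih (by push_cast at hm ⊢; omega) cnt hsh
    rw [show ((m + 1 : Nat) : Int) = (m : Int) + 1 by push_cast; ring,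
        PySem.List.pyRange_one_succ_right (by positivity), List.foldl_append]
    simp only [List.foldl_cons, List.foldl_nil]
    have hmw : (m : Int) < pvW seats := by push_cast at hm; omega
    set t1 := (PySem.List.pyRange 0 (m : Int) 1).foldl (fun cnt x =>
      if (v.getD y.toNat []).getD x.toNat none == some "#" then
        cnt.set y.toNat ((cnt.getD y.toNat []).set x.toNat
          (((cnt.getD y.toNat []).getD x.toNat 0) + 1))
      else cnt) cnt with ht1
    have hyl : y.toNat < t1.length := by
      rw [ih1.1]
      unfold pvH at hyh
      omega
    have hxl : ((m : Int)).toNat < (t1.getD y.toNat []).length := by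
      rw [List.getD_eq_getElem _ _ hyl, ih1.2 _ (List.getElem_mem hyl)]
      unfold pvW at hmw
      omega
    have hstep_sh : pvShape seats (if (v.getD y.toNat []).getD ((m : Int)).toNat none == some "#" then
        t1.set y.toNat ((t1.getD y.toNat []).set ((m : Int)).toNat
          (((t1.getD y.toNat []).getD ((m : Int)).toNat 0) + 1))
      else t1) := by
      split
      · exact pvShape_set seats t1 ih1 _ _ _
      · exact ih1
    have hfr : ∀ a b : Int, 0 ≤ a → 0 ≤ b → ¬(a = (m : Int) ∧ b = y) →
        pvLk 0 (if (v.getD y.toNat []).getD ((m : Int)).toNat none == some "#" then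
          t1.set y.toNat ((t1.getD y.toNat []).set ((m : Int)).toNat
            (((t1.getD y.toNat []).getD ((m : Int)).toNat 0) + 1))
        else t1) a b = pvLk 0 t1 a b := by
      intro a b ha hb hne
      split
      · exact lk_set_ne 0 t1 (m : Int) y _ a b (by positivity) hy0 ha hb hne
      · rfl
    refine ⟨hstep_sh, ?_, ?_, ?_⟩
    · intro a b ha hb hby
      rw [hfr a b ha hb (fun h => hby h.2), ih2 a b ha hb hby]
    · intro a ha ham
      by_cases ham2 : a = (m : Int)
      · rw [ham2]
        by_cases hind : ((v.getD y.toNat []).getD ((m : Int)).toNat none == some "#") = true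
        · rw [if_pos hind, lk_set_self 0 t1 (m : Int) y _ hyl hxl]
          show pvLk 0 t1 (m : Int) y + 1 = _
          rw [ih4 (m : Int) (le_refl _),
            if_pos (show (pvLk none v (m : Int) y == some "#") = true by
              simp only [pvLk]; exact hind)]
        · rw [if_neg hind, ih4 (m : Int) (le_refl _),
            if_neg (show ¬ ((pvLk none v (m : Int) y == some "#") = true) by
              simp only [pvLk]; exact hind), add_zero]
      · rw [hfr a y ha hy0 (fun h => ham2 h.1), ih3 a ha (by omega)]
    · intro a ha
      rw [hfr a y (by omega) hy0 (fun h => by omega), ih4 a (by omega)]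

lemma capOuter (seats : List (List String)) (v : List (List (Option String))) :
    ∀ (m : Nat), (m : Int) ≤ pvH seats → ∀ cnt : List (List Int), pvShape seats cnt →
      (pvShape seats ((PySem.List.pyRange 0 (m : Int) 1).foldl (fun cnt y =>
          (PySem.List.pyRange 0 (pvW seats) 1).foldl (fun cnt x =>
            if (v.getD y.toNat []).getD x.toNat none == some "#" then
              cnt.set y.toNat ((cnt.getD y.toNat []).set x.toNat
                (((cnt.getD y.toNat []).getD x.toNat 0) + 1))
            else cnt) cnt) cnt) ∧
       (∀ a b, 0 ≤ a → a < pvW seats → 0 ≤ b →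
          pvLk 0 ((PySem.List.pyRange 0 (m : Int) 1).foldl (fun cnt y =>
            (PySem.List.pyRange 0 (pvW seats) 1).foldl (fun cnt x =>
              if (v.getD y.toNat []).getD x.toNat none == some "#" then
                cnt.set y.toNat ((cnt.getD y.toNat []).set x.toNat
                  (((cnt.getD y.toNat []).getD x.toNat 0) + 1))
              else cnt) cnt) cnt) a b
          = pvLk 0 cnt a b
            + (if b < (m : Int) then (if pvLk none v a b == some "#" then 1 else 0) else 0))) := by
  intro m
  induction m with
  | zero =>
    intro _ cnt hsh
    rw [show ((0 : Nat) : Int) = 0 from rfl, PySem.List.pyRange_one_eq_nil (le_refl 0)]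
    simp only [List.foldl_nil]
    refine ⟨hsh, ?_⟩
    intro a b ha haw hb
    rw [if_neg (show ¬ (b < (0 : Int)) by omega), add_zero]
  | succ m ih =>
    intro hm cnt hsh
    obtain ⟨ih1, ih2⟩ := ih (by push_cast at hm ⊢; omega) cnt hsh
    rw [show ((m + 1 : Nat) : Int) = (m : Int) + 1 by push_cast; ring,
        PySem.List.pyRange_one_succ_right (by positivity), List.foldl_append]
    simp only [List.foldl_cons, List.foldl_nil]
    have hmh : (m : Int) < pvH seats := by push_cast at hm; omega
    have hWnat : pvW seats = (((seats.headD []).length : Nat) : Int) := rfl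
    obtain ⟨s1, s2, s3, s4⟩ := capRow seats v (m : Int) (by positivity) hmh
      (seats.headD []).length (by rw [hWnat]) _ ih1
    rw [← hWnat] at s1 s2 s3 s4
    refine ⟨s1, ?_⟩
    intro a b ha haw hb
    by_cases hbm : b = (m : Int)
    · rw [hbm, s3 a ha haw, ih2 a (m : Int) ha haw (by positivity),
        if_neg (show ¬ ((m : Int) < (m : Int)) by omega),
        if_pos (show (m : Int) < (m : Int) + 1 by omega), add_zero]
    · rw [s2 a b ha hb hbm, ih2 a b ha haw hb]
      by_cases hlt : b < (m : Int)
      · rw [if_pos hlt, if_pos (show b < (m : Int) + 1 by omega)]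
      · rw [if_neg hlt, if_neg (show ¬ (b < (m : Int) + 1) by omega)]

-- ---- B-side: the full count table counts occupied visible seats over all 8 directions ----
def pvCount (seats : List (List String)) : List (List Int) :=
  pvDirs.foldl (fun cnt d => pvCap seats (pvVis seats d) cnt)
    (List.replicate (pvH seats).toNat (List.replicate (pvW seats).toNat (0 : Int)))

lemma cap_full (seats : List (List String)) (v : List (List (Option String)))
    (cnt : List (List Int)) (hsh : pvShape seats cnt) :
    pvShape seats (pvCap seats v cnt) ∧
    (∀ a b, 0 ≤ a → a < pvW seats → 0 ≤ b → b < pvH seats →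
      pvLk 0 (pvCap seats v cnt) a b
        = pvLk 0 cnt a b + (if pvLk none v a b == some "#" then 1 else 0)) := by
  have hH : pvH seats = ((seats.length : Nat) : Int) := rfl
  obtain ⟨c1, c2⟩ := capOuter seats v seats.length (by rw [hH]) cnt hsh
  refine ⟨c1, ?_⟩
  intro a b ha haw hb hbh
  have := c2 a b ha haw hb
  rw [if_pos (show b < ((seats.length : Nat) : Int) by rw [← hH]; exact hbh)] at this
  exact this

lemma count_correct (seats : List (List String)) :
    ∀ a b, 0 ≤ a → a < pvW seats → 0 ≤ b → b < pvH seats →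
      pvLk 0 (pvCount seats) a b = (pvCnt seats a b : Int) := by
  intro a b ha haw hb hbh
  have h0 : pvShape seats (List.replicate (pvH seats).toNat
      (List.replicate (pvW seats).toNat (0 : Int))) := pvShape_replicate seats 0
  have hl0 : pvLk 0 (List.replicate (pvH seats).toNat
      (List.replicate (pvW seats).toNat (0 : Int))) a b = 0 := lk_replicate 0 _ _ a b
  have hd1 : ((1 : Int), (0 : Int)) ∈ pvDirs := by simp [pvDirs]
  have hd2 : ((1 : Int), (1 : Int)) ∈ pvDirs := by simp [pvDirs]
  have hd3 : ((0 : Int), (1 : Int)) ∈ pvDirs := by simp [pvDirs]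
  have hd4 : ((-1 : Int), (1 : Int)) ∈ pvDirs := by simp [pvDirs]
  have hd5 : ((-1 : Int), (0 : Int)) ∈ pvDirs := by simp [pvDirs]
  have hd6 : ((-1 : Int), (-1 : Int)) ∈ pvDirs := by simp [pvDirs]
  have hd7 : ((0 : Int), (-1 : Int)) ∈ pvDirs := by simp [pvDirs]
  have hd8 : ((1 : Int), (-1 : Int)) ∈ pvDirs := by simp [pvDirs]
  have c1 := cap_full seats (pvVis seats (1, 0)) _ h0
  have c2 := cap_full seats (pvVis seats (1, 1)) _ c1.1
  have c3 := cap_full seats (pvVis seats (0, 1)) _ c2.1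
  have c4 := cap_full seats (pvVis seats (-1, 1)) _ c3.1
  have c5 := cap_full seats (pvVis seats (-1, 0)) _ c4.1
  have c6 := cap_full seats (pvVis seats (-1, -1)) _ c5.1
  have c7 := cap_full seats (pvVis seats (0, -1)) _ c6.1
  have c8 := cap_full seats (pvVis seats (1, -1)) _ c7.1
  have hfin : pvLk 0 (pvCount seats) a b
      = (if pvR seats (1, 0) a b == some "#" then (1 : Int) else 0)
      + (if pvR seats (1, 1) a b == some "#" then (1 : Int) else 0)
      + (if pvR seats (0, 1) a b == some "#" then (1 : Int) else 0)
      + (if pvR seats (-1, 1) a b == some "#" then (1 : Int) else 0)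
      + (if pvR seats (-1, 0) a b == some "#" then (1 : Int) else 0)
      + (if pvR seats (-1, -1) a b == some "#" then (1 : Int) else 0)
      + (if pvR seats (0, -1) a b == some "#" then (1 : Int) else 0)
      + (if pvR seats (1, -1) a b == some "#" then (1 : Int) else 0) := by
    show pvLk 0 (pvCap seats (pvVis seats (1, -1)) (pvCap seats (pvVis seats (0, -1)) (pvCap seats (pvVis seats (-1, -1)) (pvCap seats (pvVis seats (-1, 0)) (pvCap seats (pvVis seats (-1, 1)) (pvCap seats (pvVis seats (0, 1)) (pvCap seats (pvVis seats (1, 1)) (pvCap seats (pvVis seats (1, 0)) (List.replicate (pvH seats).toNat (List.replicate (pvW seats).toNat (0 : Int))))))))))) a b = _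
    rw [c8.2 a b ha haw hb hbh, c7.2 a b ha haw hb hbh, c6.2 a b ha haw hb hbh,
        c5.2 a b ha haw hb hbh, c4.2 a b ha haw hb hbh, c3.2 a b ha haw hb hbh,
        c2.2 a b ha haw hb hbh, c1.2 a b ha haw hb hbh, hl0,
        vis_correct seats (1, 0) hd1 a b ha haw hb hbh,
        vis_correct seats (1, 1) hd2 a b ha haw hb hbh,
        vis_correct seats (0, 1) hd3 a b ha haw hb hbh,
        vis_correct seats (-1, 1) hd4 a b ha haw hb hbh,
        vis_correct seats (-1, 0) hd5 a b ha haw hb hbh,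
        vis_correct seats (-1, -1) hd6 a b ha haw hb hbh,
        vis_correct seats (0, -1) hd7 a b ha haw hb hbh,
        vis_correct seats (1, -1) hd8 a b ha haw hb hbh]
    ring
  rw [hfin]
  simp only [pvCnt, pvDirs, List.countP_cons, List.countP_nil]
  push_cast
  ring

-- ---- B-side: the dispatch pass, rewritten cell-by-cell and put in closed form ----
lemma stepB_eq (seats : List (List String)) (x y : Int)
    (hx : 0 ≤ x) (hxw : x < pvW seats) (hy : 0 ≤ y) (hyh : y < pvH seats)
    (st : List (List String) × Int) :
    (st.1.set y.toNat ((st.1.getD y.toNat []).set x.toNat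
        (if pvCell seats x y = "L" ∧ ((pvCount seats).getD y.toNat []).getD x.toNat 0 = 0 then "#"
         else if pvCell seats x y = "#" ∧ 5 ≤ ((pvCount seats).getD y.toNat []).getD x.toNat 0 then "L"
         else pvCell seats x y)),
     if (if pvCell seats x y = "L" ∧ ((pvCount seats).getD y.toNat []).getD x.toNat 0 = 0 then "#"
         else if pvCell seats x y = "#" ∧ 5 ≤ ((pvCount seats).getD y.toNat []).getD x.toNat 0 then "L"
         else pvCell seats x y) = "#" then st.2 + 1 else st.2)
    = (st.1.set y.toNat ((st.1.getD y.toNat []).set x.toNat (newCell seats x y)),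
       st.2 + pvInd seats x y) := by
  have hk : ((pvCount seats).getD y.toNat []).getD x.toNat 0 = (pvCnt seats x y : Int) :=
    count_correct seats x y hx hxw hy hyh
  have hc' : (if pvCell seats x y = "L" ∧ ((pvCount seats).getD y.toNat []).getD x.toNat 0 = 0 then "#"
      else if pvCell seats x y = "#" ∧ 5 ≤ ((pvCount seats).getD y.toNat []).getD x.toNat 0 then "L"
      else pvCell seats x y) = newCell seats x y := by
    rw [hk]
    unfold newCell
    have e1 : ((pvCnt seats x y : Int) = 0) ↔ (pvCnt seats x y = 0) := by exact_mod_cast Iff.rfl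
    have e2 : ((5 : Int) ≤ (pvCnt seats x y : Int)) ↔ (5 ≤ pvCnt seats x y) := by
      exact_mod_cast Iff.rfl
    rw [if_congr (and_congr_right fun _ => e1) rfl
        (if_congr (and_congr_right fun _ => e2) rfl rfl)]
  rw [hc']
  by_cases hnc : newCell seats x y = "#"
  · simp [pvInd, hnc]
  · simp [pvInd, hnc]

lemma innerB (seats : List (List String)) (y : Int) :
    ∀ (m : Nat) (g : List (List String)) (occ : Int), y.toNat < g.length →
      (PySem.List.pyRange 0 (m : Int) 1).foldl (fun st x =>
          (st.1.set y.toNat ((st.1.getD y.toNat []).set x.toNat (newCell seats x y)),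
           st.2 + pvInd seats x y)) (g, occ)
      = (g.set y.toNat ((g.getD y.toNat []).mapIdx
            (fun xx c => if xx < m then newCell seats (xx : Int) y else c)),
         occ + ((List.range m).map (fun (xx : Nat) => pvInd seats (xx : Int) y)).sum) := by
  intro m
  induction m with
  | zero =>
    intro g occ hyl
    rw [show ((0 : Nat) : Int) = 0 from rfl, PySem.List.pyRange_one_eq_nil (le_refl 0)]
    simp only [List.foldl_nil, List.range_zero, List.map_nil, List.sum_nil, add_zero]
    congr 1
    rw [show (g.getD y.toNat []).mapIdx (fun xx c => if xx < 0 then newCell seats (xx : Int) y else c)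
        = g.getD y.toNat [] by
      apply List.ext_getElem (by simp)
      intro i h1 h2
      simp]
    apply List.ext_getElem (by simp)
    intro i h1 h2
    rw [List.getElem_set]
    split
    · next he =>
      subst he
      rw [List.getD_eq_getElem _ _ (by simpa using h2)]
    · rfl
  | succ m ih =>
    intro g occ hyl
    rw [show ((m + 1 : Nat) : Int) = (m : Int) + 1 by push_cast; ring,
        PySem.List.pyRange_one_succ_right (by positivity), List.foldl_append, ih g occ hyl]
    simp only [List.foldl_cons, List.foldl_nil]
    rw [Prod.mk.injEq]
    constructor
    · rw [List.set_set, getD_set_self_pv _ _ _ hyl]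
      congr 1
      apply List.ext_getElem (by simp)
      intro i h1 h2
      have hil : i < (g.getD y.toNat []).length := by simpa using h1
      rw [List.getElem_set]
      simp only [Int.toNat_natCast, List.getElem_mapIdx]
      split
      · next he =>
        subst he
        rw [if_pos (by omega)]
      · next he =>
        by_cases hi : i < m
        · rw [if_pos hi, if_pos (by omega)]
        · rw [if_neg hi, if_neg (by omega)]
    · rw [List.range_succ, List.map_append, List.sum_append]
      simp only [List.map_cons, List.map_nil, List.sum_cons, List.sum_nil, add_zero]
      ring

lemma outerB (seats : List (List String)) :
    ∀ (k : Nat), k ≤ seats.length →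
      (PySem.List.pyRange 0 (k : Int) 1).foldl (fun st y =>
          (PySem.List.pyRange 0 (pvW seats) 1).foldl (fun st x =>
            (st.1.set y.toNat ((st.1.getD y.toNat []).set x.toNat (newCell seats x y)),
             st.2 + pvInd seats x y)) st) (seats, (0 : Int))
      = (seats.mapIdx (fun yy row => if yy < k then row.mapIdx (fun xx c =>
            if xx < (seats.headD []).length then newCell seats (xx : Int) (yy : Int) else c) else row),
         ((List.range k).map (fun (yy : Nat) =>
            ((List.range (seats.headD []).length).map
              (fun (xx : Nat) => pvInd seats (xx : Int) (yy : Int))).sum)).sum) := by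
  intro k
  induction k with
  | zero =>
    intro _
    rw [show ((0 : Nat) : Int) = 0 from rfl, PySem.List.pyRange_one_eq_nil (le_refl 0)]
    simp only [List.foldl_nil, List.range_zero, List.map_nil, List.sum_nil]
    congr 1
    apply List.ext_getElem (by simp)
    intro i h1 h2
    simp
  | succ k ih =>
    intro hk
    rw [show ((k + 1 : Nat) : Int) = (k : Int) + 1 by push_cast; ring,
        PySem.List.pyRange_one_succ_right (by positivity), List.foldl_append, ih (by omega)]
    simp only [List.foldl_cons, List.foldl_nil]
    have hW : pvW seats = (((seats.headD []).length : Nat) : Int) := rfl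
    have hkl : ((k : Int)).toNat < (seats.mapIdx (fun yy row => if yy < k then row.mapIdx (fun xx c =>
        if xx < (seats.headD []).length then newCell seats (xx : Int) (yy : Int) else c) else row)).length := by
      simp only [List.length_mapIdx, Int.toNat_natCast]
      omega
    rw [hW, innerB seats (k : Int) (seats.headD []).length _ _ hkl]
    rw [Prod.mk.injEq]
    constructor
    · apply List.ext_getElem (by simp)
      intro i h1 h2
      have hig : i < seats.length := by simpa using h2
      simp only [Int.toNat_natCast, List.getElem_set, List.getElem_mapIdx]
      by_cases hik : k = i
      · subst hik
        rw [if_pos rfl, if_pos (by omega)]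
        have hrow : ((seats.mapIdx (fun yy row => if yy < k then row.mapIdx (fun xx c =>
            if xx < (seats.headD []).length then newCell seats (xx : Int) (yy : Int) else c) else row)).getD k [])
            = seats[k] := by
          rw [List.getD_eq_getElem _ _ (by simpa using hig), List.getElem_mapIdx,
            if_neg (by omega)]
        rw [hrow]
      · rw [if_neg hik]
        by_cases hik2 : i < k
        · rw [if_pos hik2, if_pos (by omega)]
        · rw [if_neg hik2, if_neg (by omega)]
    · rw [List.range_succ, List.map_append, List.sum_append]
      simp

lemma runB_closed (seats : List (List String)) :
    run_pass_alt seats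
      = (seats.mapIdx (fun yy row => row.mapIdx (fun xx c =>
            if xx < (seats.headD []).length then newCell seats (xx : Int) (yy : Int) else c)),
         ((List.range seats.length).map (fun (yy : Nat) =>
            ((List.range (seats.headD []).length).map
              (fun (xx : Nat) => pvInd seats (xx : Int) (yy : Int))).sum)).sum) := by
  have h0 : run_pass_alt seats
      = (PySem.List.pyRange 0 (pvH seats) 1).foldl (fun st y =>
          (PySem.List.pyRange 0 (pvW seats) 1).foldl (fun st x =>
            (st.1.set y.toNat ((st.1.getD y.toNat []).set x.toNat
              (if pvCell seats x y = "L" ∧ ((pvCount seats).getD y.toNat []).getD x.toNat 0 = 0 then "#"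
               else if pvCell seats x y = "#" ∧ 5 ≤ ((pvCount seats).getD y.toNat []).getD x.toNat 0 then "L"
               else pvCell seats x y)),
             if (if pvCell seats x y = "L" ∧ ((pvCount seats).getD y.toNat []).getD x.toNat 0 = 0 then "#"
                 else if pvCell seats x y = "#" ∧ 5 ≤ ((pvCount seats).getD y.toNat []).getD x.toNat 0 then "L"
                 else pvCell seats x y) = "#" then st.2 + 1 else st.2)) st)
        (seats.map (fun row => row), (0 : Int)) := rfl
  rw [h0]
  have h1 : seats.map (fun row => row) = seats := by simp
  rw [h1]
  rw [PySem.List.foldl_congr_mem _ _ (fun st y =>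
      (PySem.List.pyRange 0 (pvW seats) 1).foldl (fun st x =>
        (st.1.set y.toNat ((st.1.getD y.toNat []).set x.toNat (newCell seats x y)),
         st.2 + pvInd seats x y)) st) _ ?_]
  · have hH : pvH seats = ((seats.length : Nat) : Int) := rfl
    rw [hH, outerB seats seats.length (le_refl _)]
    congr 1
    apply List.ext_getElem (by simp)
    intro i h1 h2
    have hig : i < seats.length := by simpa using h1
    simp only [List.getElem_mapIdx]
    rw [if_pos hig]
  · intro st y hy
    rw [PySem.List.mem_pyRange_one] at hy
    exact PySem.List.foldl_congr_mem _ _ _ _ (by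
      intro st2 x hx
      rw [PySem.List.mem_pyRange_one] at hx
      exact stepB_eq seats x y hx.1 hx.2 hy.1 hy.2 st2)

lemma final_eq (seats : List (List String)) :
    run_pass seats = run_pass_alt seats := by
  rw [runA_closed, runB_closed, Prod.mk.injEq]
  exact ⟨rfl, sum_swap_pv (fun xx yy => pvInd seats (xx : Int) (yy : Int))
    (seats.headD []).length seats.length⟩

-- ===== VERDICT (by name: the statement is the Claim_ definition above) =====
theorem run_pass_spec : Claim_equal_run_pass := by
  intro seats _ _
  unfold Spec_run_pass
  exact final_eq seats
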